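-- pv_equiv track=rewrite | github.com/wnstj-yang/Algorithm | Programmers/programmers_행렬 테두리 회전하기.py | solution
-- ===== SOURCE A (Python) =====
-- def solution(rows, columns, queries):
--     answer = []
--     arr = [[0] * (columns + 1) for _ in range(rows + 1)]
--     num = 1
--     # 값 초기화
--     for i in range(1, rows + 1):
--         for j in range(1, columns + 1):
--             arr[i][j] = num
--             num += 1
--
--     for info in queries:
--         x1, y1, x2, y2 = info[0], info[1], info[2], info[3]
--         # 좌 -> 우
--         value = arr[x1][y1]
--         min_val = value
--         for j in range(y1 + 1, y2 + 1):
--             temp = arr[x1][j]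
--             arr[x1][j] = value
--             value = temp
--             min_val = min(min_val, value)
--         # 상 -> 하
--         for i in range(x1 + 1, x2 + 1):
--             temp = arr[i][y2]
--             arr[i][y2] = value
--             value = temp
--             min_val = min(min_val, value)
--         # 우 -> 좌
--         for j in range(y2 - 1, y1 - 1, -1):
--             temp = arr[x2][j]
--             arr[x2][j] = value
--             value = temp
--             min_val = min(min_val, value)
--         # 하 -> 상
--         for i in range(x2 - 1, x1 - 1, -1):
--             temp = arr[i][y1]
--             arr[i][y1] = value
--             value = temp
--             min_val = min(min_val, value)
--
--         answer.append(min_val)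
--     return answer
-- ===== SOURCE B (Python) =====
-- def solution(rows, columns, queries):
--     # 1-indexed grid with a sentinel 0-row and 0-column so queries index directly
--     grid = [[0] * (columns + 1)] + [[0] + [(i - 1) * columns + j for j in range(1, columns + 1)]
--                                     for i in range(1, rows + 1)]
--     answer = []
--     for q in queries:
--         x1, y1, x2, y2 = q[0], q[1], q[2], q[3]
--         border = ([(x1, j) for j in range(y1, y2)] +
--                   [(i, y2) for i in range(x1, x2)] +
--                   [(x2, j) for j in range(y2, y1, -1)] +
--                   [(i, y1) for i in range(x2, x1, -1)])
--         vals = [grid[i][j] for i, j in border]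
--         answer.append(min(vals))
--         for (i, j), v in zip(border, vals[-1:] + vals[:-1]):
--             grid[i][j] = v
--     return answer
-- ===== Notes on version B (the rewrite author's own statement) =====
-- stated objective: alternative
-- what changed: Replaces the counter-driven init loops and the four carry-and-swap rotation loops with a closed-form grid comprehension and a gather/rotate/scatter over one explicit clockwise border-coordinate list (min is taken over the gathered values).
-- outside the precondition, e.g. on solution(3, 3, [[1, 1, 1, 3], [1, 1, 1, 3]]): A returns [1, 1], B returns [1, 2]; on solution(3, 3, [[1, 2, 1, 2]]): A returns [2], B raises ValueError; on solution(3, 3, [[0, 1, 2, 2]]): A returns [0], B returns [0]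
import Mathlib
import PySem

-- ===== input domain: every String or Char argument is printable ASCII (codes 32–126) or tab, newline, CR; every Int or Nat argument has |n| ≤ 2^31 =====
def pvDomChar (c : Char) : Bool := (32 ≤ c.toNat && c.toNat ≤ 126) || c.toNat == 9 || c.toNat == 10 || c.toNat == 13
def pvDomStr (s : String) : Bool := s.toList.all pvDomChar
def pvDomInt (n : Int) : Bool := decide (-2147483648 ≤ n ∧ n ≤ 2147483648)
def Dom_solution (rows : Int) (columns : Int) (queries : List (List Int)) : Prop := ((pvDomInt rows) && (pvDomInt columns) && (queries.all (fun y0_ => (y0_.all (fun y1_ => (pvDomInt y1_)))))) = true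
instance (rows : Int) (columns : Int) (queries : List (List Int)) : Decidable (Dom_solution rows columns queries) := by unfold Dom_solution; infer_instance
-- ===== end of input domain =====

-- B replaces A's counter-driven init loops and four carry-and-swap rotation loops by a
-- closed-form grid and a gather/rotate/scatter over one explicit clockwise border list
-- (same cost; the objective is an alternative decomposition, not speed).


-- ===== PORT A =====
-- arr[i][j] read / assignment on the list-of-lists matrix: exact for 0 ≤ index < length,
-- which covers every access Pre_solution admits (Python raises IndexError or wraps a
-- negative index outside that; such accesses are excluded by Pre_solution).
def readM (m : List (List Int)) (i j : Int) : Int :=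
  PySem.List.pyGetD (PySem.List.pyGetD m i []) j 0

def writeM (m : List (List Int)) (i j v : Int) : List (List Int) :=
  PySem.List.pySetD m i (PySem.List.pySetD (PySem.List.pyGetD m i []) j v)

def solution (rows : Int) (columns : Int) (queries : List (List Int)) : List Int :=
  -- arr = [[0] * (columns + 1) for _ in range(rows + 1)]
  let arr0 : List (List Int) :=
    (PySem.List.pyRange 0 (rows + 1) 1).map (fun _ => PySem.List.pyRepeat [(0 : Int)] (columns + 1))
  -- for i in range(1, rows+1): for j in range(1, columns+1): arr[i][j] = num; num += 1
  let init :=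
    (PySem.List.pyRange 1 (rows + 1) 1).foldl
      (fun (s : List (List Int) × Int) i =>
        (PySem.List.pyRange 1 (columns + 1) 1).foldl
          (fun (s : List (List Int) × Int) j => (writeM s.1 i j s.2, s.2 + 1)) s)
      (arr0, 1)
  -- for info in queries: the four carry-and-swap loops; state (arr, answer)
  (queries.foldl
    (fun (s : List (List Int) × List Int) info =>
      let x1 := PySem.List.pyGetD info 0 0
      let y1 := PySem.List.pyGetD info 1 0
      let x2 := PySem.List.pyGetD info 2 0
      let y2 := PySem.List.pyGetD info 3 0
      let value := readM s.1 x1 y1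
      let t1 := (PySem.List.pyRange (y1 + 1) (y2 + 1) 1).foldl
        (fun (t : List (List Int) × Int × Int) j =>
          (writeM t.1 x1 j t.2.1, readM t.1 x1 j, min t.2.2 (readM t.1 x1 j)))
        (s.1, value, value)
      let t2 := (PySem.List.pyRange (x1 + 1) (x2 + 1) 1).foldl
        (fun (t : List (List Int) × Int × Int) i =>
          (writeM t.1 i y2 t.2.1, readM t.1 i y2, min t.2.2 (readM t.1 i y2))) t1
      let t3 := (PySem.List.pyRange (y2 - 1) (y1 - 1) (-1)).foldl
        (fun (t : List (List Int) × Int × Int) j =>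
          (writeM t.1 x2 j t.2.1, readM t.1 x2 j, min t.2.2 (readM t.1 x2 j))) t2
      let t4 := (PySem.List.pyRange (x2 - 1) (x1 - 1) (-1)).foldl
        (fun (t : List (List Int) × Int × Int) i =>
          (writeM t.1 i y1 t.2.1, readM t.1 i y1, min t.2.2 (readM t.1 i y1))) t3
      (t4.1, s.2 ++ [t4.2.2]))
    (init.1, ([] : List Int))).2

-- ===== PORT B =====
-- clockwise border coordinates of the sub-rectangle, corners not repeated
def bBorder (x1 y1 x2 y2 : Int) : List (Int × Int) :=
  (PySem.List.pyRange y1 y2 1).map (fun j => (x1, j)) ++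
  (PySem.List.pyRange x1 x2 1).map (fun i => (i, y2)) ++
  (PySem.List.pyRange y2 y1 (-1)).map (fun j => (x2, j)) ++
  (PySem.List.pyRange x2 x1 (-1)).map (fun i => (i, y1))

def solution_alt (rows : Int) (columns : Int) (queries : List (List Int)) : List Int :=
  -- grid = [[0]*(columns+1)] + [[0] + [(i-1)*columns + j for j in 1..columns] for i in 1..rows]
  let grid : List (List Int) :=
    [PySem.List.pyRepeat [(0 : Int)] (columns + 1)] ++
    (PySem.List.pyRange 1 (rows + 1) 1).map (fun i =>
      [(0 : Int)] ++ (PySem.List.pyRange 1 (columns + 1) 1).map (fun j => (i - 1) * columns + j))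
  (queries.foldl
    (fun (s : List (List Int) × List Int) q =>
      let border := bBorder (PySem.List.pyGetD q 0 0) (PySem.List.pyGetD q 1 0)
                            (PySem.List.pyGetD q 2 0) (PySem.List.pyGetD q 3 0)
      let vals := border.map (fun c => readM s.1 c.1 c.2)
      -- min(vals); ValueError on an empty border is excluded by Pre_solution
      let mn := (PySem.List.min? vals (fun v => v)).getD 0
      -- vals[-1:] + vals[:-1]
      let rotated := PySem.List.slice vals (some (-1)) none ++ PySem.List.slice vals none (some (-1))
      ((border.zip rotated).foldl (fun g p => writeM g p.1.1 p.1.2 p.2) s.1, s.2 ++ [mn]))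
    (grid, ([] : List Int))).2

-- ===== PRECONDITION & SPEC =====
-- Pre_solution admits exactly the problem's stated query shape (≥4 entries, 1 ≤ x1 < x2 ≤ rows,
-- 1 ≤ y1 < y2 ≤ columns). Outside it A raises IndexError, or returns values that are accidents
-- of its implementation: reads of the sentinel zero row/column or of a negative wrapped index,
-- and degenerate (flat) borders traversed twice by the carry loops.
def Pre_solution (rows : Int) (columns : Int) (queries : List (List Int)) : Prop :=
  ∀ q ∈ queries, 4 ≤ q.length ∧
    1 ≤ q.getD 0 0 ∧ q.getD 0 0 < q.getD 2 0 ∧ q.getD 2 0 ≤ rows ∧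
    1 ≤ q.getD 1 0 ∧ q.getD 1 0 < q.getD 3 0 ∧ q.getD 3 0 ≤ columns
instance (rows : Int) (columns : Int) (queries : List (List Int)) : Decidable (Pre_solution rows columns queries) := by unfold Pre_solution; infer_instance

def pvWitness_solution : Int × Int × List (List Int) := (3, 3, [[1, 1, 2, 2]])

def Spec_solution (rows : Int) (columns : Int) (queries : List (List Int)) (out : List Int) : Prop := out = solution_alt rows columns queries
instance (rows : Int) (columns : Int) (queries : List (List Int)) (out : List Int) : Decidable (Spec_solution rows columns queries out) := by unfold Spec_solution; infer_instance

-- ===== CLAIM (what is proved, stated in full; the proofs are below) =====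
def Claim_equal_solution : Prop := ∀ (rows : Int) (columns : Int) (queries : List (List Int)), Dom_solution rows columns queries → Pre_solution rows columns queries → Spec_solution rows columns queries (solution rows columns queries)

-- ===== LEMMAS AND PROOFS =====

theorem pv_getD_setD_ne {α : Type} (xs : List α) (i i' : Int) (v : α) (d : α)
    (h0 : 0 ≤ i) (h0' : 0 ≤ i') (hne : i ≠ i') :
    PySem.List.pyGetD (PySem.List.pySetD xs i v) i' d = PySem.List.pyGetD xs i' d := by
  rw [PySem.List.pySetD_of_nonneg xs v h0, PySem.List.pyGetD_of_nonneg _ d h0',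
      PySem.List.pyGetD_of_nonneg xs d h0', List.getD_eq_getElem?_getD, List.getD_eq_getElem?_getD,
      List.getElem?_set_ne (by omega)]
theorem pv_getD_setD_self {α : Type} (xs : List α) (i : Int) (v : α) (d : α)
    (h0 : 0 ≤ i) (hlt : i.toNat < xs.length) :
    PySem.List.pyGetD (PySem.List.pySetD xs i v) i d = v := by
  rw [PySem.List.pySetD_of_nonneg xs v h0, PySem.List.pyGetD_of_nonneg _ d h0,
      List.getD_eq_getElem?_getD, List.getElem?_set_self hlt]; rfl
theorem pv_setD_oob {α : Type} (xs : List α) (i : Int) (v : α) (h0 : 0 ≤ i)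
    (h : xs.length ≤ i.toNat) : PySem.List.pySetD xs i v = xs := by
  rw [PySem.List.pySetD_of_nonneg xs v h0, List.set_eq_of_length_le h]
theorem pv_setD_setD_self {α : Type} (xs : List α) (i : Int) (v w : α) (h0 : 0 ≤ i) :
    PySem.List.pySetD (PySem.List.pySetD xs i v) i w = PySem.List.pySetD xs i w := by
  rw [PySem.List.pySetD_of_nonneg xs v h0, PySem.List.pySetD_of_nonneg _ w h0,
      PySem.List.pySetD_of_nonneg xs w h0, List.set_set]

theorem pv_readM_writeM_ne (m : List (List Int)) (i j i' j' v : Int)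
    (h1 : 0 ≤ i) (h2 : 0 ≤ j) (h3 : 0 ≤ i') (h4 : 0 ≤ j') (hne : (i, j) ≠ (i', j')) :
    readM (writeM m i j v) i' j' = readM m i' j' := by
  unfold readM writeM
  by_cases hii : i = i'
  · subst hii
    have hjj : j ≠ j' := by intro h; exact hne (by rw [h])
    by_cases hlt : i.toNat < m.length
    · rw [pv_getD_setD_self m i _ [] h1 hlt, pv_getD_setD_ne _ j j' v 0 h2 h4 hjj]
    · rw [pv_setD_oob m i _ h1 (by omega)]
  · rw [pv_getD_setD_ne m i i' _ [] h1 h3 hii]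

theorem pv_writeM_comm (m : List (List Int)) (i j i' j' v v' : Int)
    (h1 : 0 ≤ i) (h2 : 0 ≤ j) (h3 : 0 ≤ i') (h4 : 0 ≤ j') (hne : (i, j) ≠ (i', j')) :
    writeM (writeM m i j v) i' j' v' = writeM (writeM m i' j' v') i j v := by
  unfold writeM
  by_cases hii : i = i'
  · subst hii
    have hjj : j ≠ j' := by intro h; exact hne (by rw [h])
    by_cases hlt : i.toNat < m.length
    · rw [pv_getD_setD_self m i _ [] h1 hlt, pv_getD_setD_self m i _ [] h1 hlt,
        pv_setD_setD_self _ i _ _ h1, pv_setD_setD_self _ i _ _ h1,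
        PySem.List.pySetD_of_nonneg _ _ h2, PySem.List.pySetD_of_nonneg _ v' h4,
        PySem.List.pySetD_of_nonneg _ v h2, PySem.List.pySetD_of_nonneg _ v' h4,
        List.set_comm _ _ (by omega)]
    · have e : ∀ r, PySem.List.pySetD m i r = m := fun r => pv_setD_oob m i r h1 (by omega)
      simp only [e]
  · rw [pv_getD_setD_ne m i i' _ [] h1 h3 hii, pv_getD_setD_ne m i' i _ [] h3 h1 (Ne.symm hii),
      PySem.List.pySetD_of_nonneg m _ h1, PySem.List.pySetD_of_nonneg _ _ h3,
      PySem.List.pySetD_of_nonneg m _ h3, PySem.List.pySetD_of_nonneg _ _ h1,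
      List.set_comm _ _ (by omega)]
def gatherM (m : List (List Int)) (cs : List (Int × Int)) : List Int :=
  cs.map (fun c => readM m c.1 c.2)
def scatterM (m : List (List Int)) (ps : List ((Int × Int) × Int)) : List (List Int) :=
  ps.foldl (fun g p => writeM g p.1.1 p.1.2 p.2) m
def chainM (s : List (List Int) × Int × Int) (cs : List (Int × Int)) :
    List (List Int) × Int × Int :=
  cs.foldl (fun t c => (writeM t.1 c.1 c.2 t.2.1, readM t.1 c.1 c.2, min t.2.2 (readM t.1 c.1 c.2))) s

theorem pv_gather_write_ne (m : List (List Int)) (i j v : Int) (cs : List (Int × Int))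
    (h1 : 0 ≤ i) (h2 : 0 ≤ j) (hnn : ∀ c ∈ cs, 0 ≤ c.1 ∧ 0 ≤ c.2) (hni : (i, j) ∉ cs) :
    gatherM (writeM m i j v) cs = gatherM m cs := by
  unfold gatherM
  apply List.map_congr_left
  intro c hc
  exact pv_readM_writeM_ne m i j c.1 c.2 v h1 h2 (hnn c hc).1 (hnn c hc).2
    (by intro h; apply hni; rw [h]; exact hc)

theorem pv_scatter_rot (m : List (List Int)) (i j w : Int) (L : List ((Int × Int) × Int))
    (h1 : 0 ≤ i) (h2 : 0 ≤ j)
    (hk : ∀ p ∈ L, (0 ≤ p.1.1 ∧ 0 ≤ p.1.2) ∧ p.1 ≠ (i, j)) :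
    scatterM m (((i, j), w) :: L) = scatterM m (L ++ [((i, j), w)]) := by
  induction L generalizing m with
  | nil => rfl
  | cons q L ih =>
    have hq := hk q (by simp)
    have hcomm : writeM (writeM m i j w) q.1.1 q.1.2 q.2
        = writeM (writeM m q.1.1 q.1.2 q.2) i j w :=
      pv_writeM_comm m i j q.1.1 q.1.2 w q.2 h1 h2 hq.1.1 hq.1.2
        (by intro h; exact hq.2 h.symm)
    show scatterM (writeM (writeM m i j w) q.1.1 q.1.2 q.2) L = _
    rw [hcomm]
    have := ih (writeM m q.1.1 q.1.2 q.2) (fun p hp => hk p (by simp [hp]))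
    exact this

theorem pv_chain_scatter (cs : List (Int × Int)) :
    ∀ (m : List (List Int)) (v mn : Int), cs.Nodup → (∀ c ∈ cs, 0 ≤ c.1 ∧ 0 ≤ c.2) →
    chainM (m, v, mn) cs =
      (scatterM m (cs.zip (v :: gatherM m cs)),
       (v :: gatherM m cs).getLastD 0,
       (gatherM m cs).foldl min mn) := by
  induction cs with
  | nil => intro m v mn _ _; rfl
  | cons c cs ih =>
    intro m v mn hnd hnn
    have hc := hnn c (by simp)
    have hnotin : c ∉ cs := (List.nodup_cons.mp hnd).1
    have hg : gatherM (writeM m c.1 c.2 v) cs = gatherM m cs :=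
      pv_gather_write_ne m c.1 c.2 v cs hc.1 hc.2 (fun d hd => hnn d (by simp [hd]))
        (by simpa using hnotin)
    show chainM (writeM m c.1 c.2 v, readM m c.1 c.2, min mn (readM m c.1 c.2)) cs = _
    rw [ih (writeM m c.1 c.2 v) (readM m c.1 c.2) (min mn (readM m c.1 c.2))
        (List.nodup_cons.mp hnd).2 (fun d hd => hnn d (by simp [hd])), hg]
    have hgath : gatherM m (c :: cs) = readM m c.1 c.2 :: gatherM m cs := rfl
    rw [hgath]
    rfl
def bTail (x1 y1 x2 y2 : Int) : List (Int × Int) :=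
  (PySem.List.pyRange (y1 + 1) y2 1).map (fun j => (x1, j)) ++
  ((PySem.List.pyRange x1 x2 1).map (fun i => (i, y2)) ++
   ((PySem.List.pyRange y2 y1 (-1)).map (fun j => (x2, j)) ++
    (PySem.List.pyRange x2 x1 (-1)).map (fun i => (i, y1))))

theorem pv_border_cons (x1 y1 x2 y2 : Int) (hy : y1 < y2) :
    bBorder x1 y1 x2 y2 = (x1, y1) :: bTail x1 y1 x2 y2 := by
  unfold bBorder bTail
  rw [PySem.List.pyRange_one_cons hy]
  simp

theorem pv_bTail_ne_nil (x1 y1 x2 y2 : Int) (hx : x1 < x2) :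
    bTail x1 y1 x2 y2 ≠ [] := by
  unfold bTail
  rw [PySem.List.pyRange_one_cons hx]
  simp

theorem pv_border_nonneg (x1 y1 x2 y2 : Int) (hx1 : 1 ≤ x1) (hy1 : 1 ≤ y1)
    (hx : x1 < x2) (hy : y1 < y2) :
    ∀ c ∈ bBorder x1 y1 x2 y2, 0 ≤ c.1 ∧ 0 ≤ c.2 := by
  intro c hc
  unfold bBorder at hc
  simp only [List.mem_append, List.mem_map, PySem.List.mem_pyRange_one,
    PySem.List.mem_pyRange_neg_one] at hc
  rcases hc with ((⟨j, hj, rfl⟩ | ⟨i, hi, rfl⟩) | ⟨j, hj, rfl⟩) | ⟨i, hi, rfl⟩ <;>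
    constructor <;> simp <;> omega

theorem pv_border_nodup (x1 y1 x2 y2 : Int) (hx : x1 < x2) (hy : y1 < y2) :
    (bBorder x1 y1 x2 y2).Nodup := by
  have hassoc : bBorder x1 y1 x2 y2 =
      (PySem.List.pyRange y1 y2 1).map (fun j => (x1, j)) ++
      ((PySem.List.pyRange x1 x2 1).map (fun i => (i, y2)) ++
       ((PySem.List.pyRange y2 y1 (-1)).map (fun j => (x2, j)) ++
        (PySem.List.pyRange x2 x1 (-1)).map (fun i => (i, y1)))) := by
    unfold bBorder; simp [List.append_assoc]
  rw [hassoc]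
  have n1 : ((PySem.List.pyRange y1 y2 1).map (fun j => ((x1, j) : Int × Int))).Nodup :=
    List.Nodup.map (fun a b h => by simpa using h) (PySem.List.nodup_pyRange_one _ _)
  have n2 : ((PySem.List.pyRange x1 x2 1).map (fun i => ((i, y2) : Int × Int))).Nodup :=
    List.Nodup.map (fun a b h => by simpa using h) (PySem.List.nodup_pyRange_one _ _)
  have n3 : ((PySem.List.pyRange y2 y1 (-1)).map (fun j => ((x2, j) : Int × Int))).Nodup := by
    rw [PySem.List.pyRange_neg_one_eq_reverse]
    exact List.Nodup.map (fun a b h => by simpa using h)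
      (List.nodup_reverse.mpr (PySem.List.nodup_pyRange_one _ _))
  have n4 : ((PySem.List.pyRange x2 x1 (-1)).map (fun i => ((i, y1) : Int × Int))).Nodup := by
    rw [PySem.List.pyRange_neg_one_eq_reverse]
    exact List.Nodup.map (fun a b h => by simpa using h)
      (List.nodup_reverse.mpr (PySem.List.nodup_pyRange_one _ _))
  refine List.Nodup.append n1 (List.Nodup.append n2 (List.Nodup.append n3 n4 ?d34) ?d234) ?d1234
  · intro c hc1 hc2
    simp only [List.mem_map, PySem.List.mem_pyRange_neg_one] at hc1 hc2
    obtain ⟨j, hj, rfl⟩ := hc1; obtain ⟨i, hi, h⟩ := hc2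
    simp only [Prod.mk.injEq] at h; omega
  · intro c hc1 hc2
    simp only [List.mem_append, List.mem_map, PySem.List.mem_pyRange_one,
      PySem.List.mem_pyRange_neg_one] at hc1 hc2
    obtain ⟨i, hi, rfl⟩ := hc1
    rcases hc2 with ⟨j', hj', h⟩ | ⟨i', hi', h⟩ <;>
      simp only [Prod.mk.injEq] at h <;> omega
  · intro c hc1 hc2
    simp only [List.mem_append, List.mem_map, PySem.List.mem_pyRange_one,
      PySem.List.mem_pyRange_neg_one] at hc1 hc2
    obtain ⟨j, hj, rfl⟩ := hc1
    rcases hc2 with ⟨i', hi', h⟩ | ⟨j', hj', h⟩ | ⟨i', hi', h⟩ <;>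
      simp only [Prod.mk.injEq] at h <;> omega
theorem pv_W_eq (x1 y1 x2 y2 : Int) (hx : x1 < x2) (hy : y1 < y2) :
    (PySem.List.pyRange (y1 + 1) (y2 + 1) 1).map (fun j => ((x1, j) : Int × Int)) ++
    ((PySem.List.pyRange (x1 + 1) (x2 + 1) 1).map (fun i => (i, y2)) ++
     ((PySem.List.pyRange (y2 - 1) (y1 - 1) (-1)).map (fun j => (x2, j)) ++
      (PySem.List.pyRange (x2 - 1) (x1 - 1) (-1)).map (fun i => (i, y1)))) =
    bTail x1 y1 x2 y2 ++ [(x1, y1)] := by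
  have e1 : PySem.List.pyRange (y1 + 1) (y2 + 1) 1
      = PySem.List.pyRange (y1 + 1) y2 1 ++ [y2] :=
    PySem.List.pyRange_one_succ_right (by omega)
  have e2 : PySem.List.pyRange (x1 + 1) (x2 + 1) 1
      = PySem.List.pyRange (x1 + 1) x2 1 ++ [x2] :=
    PySem.List.pyRange_one_succ_right (by omega)
  have e3 : PySem.List.pyRange (y2 - 1) (y1 - 1) (-1)
      = (PySem.List.pyRange (y1 + 1) y2 1).reverse ++ [y1] := by
    rw [PySem.List.pyRange_neg_one_eq_reverse]
    have h1 : y1 - 1 + 1 = y1 := by ring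
    have h2 : y2 - 1 + 1 = y2 := by ring
    rw [h1, h2, PySem.List.pyRange_one_cons hy]
    simp
  have e4 : PySem.List.pyRange (x2 - 1) (x1 - 1) (-1)
      = (PySem.List.pyRange (x1 + 1) x2 1).reverse ++ [x1] := by
    rw [PySem.List.pyRange_neg_one_eq_reverse]
    have h1 : x1 - 1 + 1 = x1 := by ring
    have h2 : x2 - 1 + 1 = x2 := by ring
    rw [h1, h2, PySem.List.pyRange_one_cons hx]
    simp
  have e3' : PySem.List.pyRange y2 y1 (-1)
      = y2 :: (PySem.List.pyRange (y1 + 1) y2 1).reverse := by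
    rw [PySem.List.pyRange_neg_one_eq_reverse,
      PySem.List.pyRange_one_succ_right (by omega : y1 + 1 ≤ y2)]
    simp
  have e4' : PySem.List.pyRange x2 x1 (-1)
      = x2 :: (PySem.List.pyRange (x1 + 1) x2 1).reverse := by
    rw [PySem.List.pyRange_neg_one_eq_reverse,
      PySem.List.pyRange_one_succ_right (by omega : x1 + 1 ≤ x2)]
    simp
  rw [e1, e2, e3, e4]
  unfold bTail
  rw [PySem.List.pyRange_one_cons hx, e3', e4']
  simp [List.append_assoc]
def qStepA (s : List (List Int) × List Int) (info : List Int) : List (List Int) × List Int :=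
  let x1 := PySem.List.pyGetD info 0 0
  let y1 := PySem.List.pyGetD info 1 0
  let x2 := PySem.List.pyGetD info 2 0
  let y2 := PySem.List.pyGetD info 3 0
  let value := readM s.1 x1 y1
  let t1 := (PySem.List.pyRange (y1 + 1) (y2 + 1) 1).foldl
    (fun (t : List (List Int) × Int × Int) j =>
      (writeM t.1 x1 j t.2.1, readM t.1 x1 j, min t.2.2 (readM t.1 x1 j)))
    (s.1, value, value)
  let t2 := (PySem.List.pyRange (x1 + 1) (x2 + 1) 1).foldl
    (fun (t : List (List Int) × Int × Int) i =>
      (writeM t.1 i y2 t.2.1, readM t.1 i y2, min t.2.2 (readM t.1 i y2))) t1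
  let t3 := (PySem.List.pyRange (y2 - 1) (y1 - 1) (-1)).foldl
    (fun (t : List (List Int) × Int × Int) j =>
      (writeM t.1 x2 j t.2.1, readM t.1 x2 j, min t.2.2 (readM t.1 x2 j))) t2
  let t4 := (PySem.List.pyRange (x2 - 1) (x1 - 1) (-1)).foldl
    (fun (t : List (List Int) × Int × Int) i =>
      (writeM t.1 i y1 t.2.1, readM t.1 i y1, min t.2.2 (readM t.1 i y1))) t3
  (t4.1, s.2 ++ [t4.2.2])

def qStepB (s : List (List Int) × List Int) (q : List Int) : List (List Int) × List Int :=
  let border := bBorder (PySem.List.pyGetD q 0 0) (PySem.List.pyGetD q 1 0)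
                        (PySem.List.pyGetD q 2 0) (PySem.List.pyGetD q 3 0)
  let vals := border.map (fun c => readM s.1 c.1 c.2)
  let mn := (PySem.List.min? vals (fun v => v)).getD 0
  let rotated := PySem.List.slice vals (some (-1)) none ++ PySem.List.slice vals none (some (-1))
  ((border.zip rotated).foldl (fun g p => writeM g p.1.1 p.1.2 p.2) s.1, s.2 ++ [mn])


theorem pv_chain_append (s : List (List Int) × Int × Int) (l1 l2 : List (Int × Int)) :
    chainM (chainM s l1) l2 = chainM s (l1 ++ l2) := by
  unfold chainM; rw [List.foldl_append]

theorem pv_step_eq (s : List (List Int) × List Int) (q : List Int)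
    (hq : 4 ≤ q.length ∧ 1 ≤ q.getD 0 0 ∧ q.getD 0 0 < q.getD 2 0 ∧
          1 ≤ q.getD 1 0 ∧ q.getD 1 0 < q.getD 3 0) :
    qStepA s q = qStepB s q := by
  obtain ⟨m, ans⟩ := s
  rcases q with _ | ⟨qa, q⟩; · exact absurd hq.1 (by simp)
  rcases q with _ | ⟨qb, q⟩; · exact absurd hq.1 (by simp)
  rcases q with _ | ⟨qc, q⟩; · exact absurd hq.1 (by simp)
  rcases q with _ | ⟨qd, q⟩; · exact absurd hq.1 (by simp)
  obtain ⟨-, h1, h2, h3, h4⟩ := hq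
  simp only [List.getD_cons_zero, List.getD_cons_succ] at h1 h2 h3 h4
  have g0 : PySem.List.pyGetD (qa :: qb :: qc :: qd :: q) 0 0 = qa := by
    rw [PySem.List.pyGetD_ofNat']; rfl
  have g1 : PySem.List.pyGetD (qa :: qb :: qc :: qd :: q) 1 0 = qb := by
    rw [PySem.List.pyGetD_ofNat']; rfl
  have g2 : PySem.List.pyGetD (qa :: qb :: qc :: qd :: q) 2 0 = qc := by
    rw [PySem.List.pyGetD_ofNat']; rfl
  have g3 : PySem.List.pyGetD (qa :: qb :: qc :: qd :: q) 3 0 = qd := by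
    rw [PySem.List.pyGetD_ofNat']; rfl
  simp only [qStepA, qStepB, g0, g1, g2, g3]
  have conv1 : ∀ (s0 : List (List Int) × Int × Int),
      (PySem.List.pyRange (qb + 1) (qd + 1) 1).foldl
        (fun t j => (writeM t.1 qa j t.2.1, readM t.1 qa j, min t.2.2 (readM t.1 qa j))) s0
      = chainM s0 ((PySem.List.pyRange (qb + 1) (qd + 1) 1).map (fun j => (qa, j))) := by
    intro s0; simp only [chainM, List.foldl_map]
  have conv2 : ∀ (s0 : List (List Int) × Int × Int),
      (PySem.List.pyRange (qa + 1) (qc + 1) 1).foldl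
        (fun t i => (writeM t.1 i qd t.2.1, readM t.1 i qd, min t.2.2 (readM t.1 i qd))) s0
      = chainM s0 ((PySem.List.pyRange (qa + 1) (qc + 1) 1).map (fun i => (i, qd))) := by
    intro s0; simp only [chainM, List.foldl_map]
  have conv3 : ∀ (s0 : List (List Int) × Int × Int),
      (PySem.List.pyRange (qd - 1) (qb - 1) (-1)).foldl
        (fun t j => (writeM t.1 qc j t.2.1, readM t.1 qc j, min t.2.2 (readM t.1 qc j))) s0
      = chainM s0 ((PySem.List.pyRange (qd - 1) (qb - 1) (-1)).map (fun j => (qc, j))) := by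
    intro s0; simp only [chainM, List.foldl_map]
  have conv4 : ∀ (s0 : List (List Int) × Int × Int),
      (PySem.List.pyRange (qc - 1) (qa - 1) (-1)).foldl
        (fun t i => (writeM t.1 i qb t.2.1, readM t.1 i qb, min t.2.2 (readM t.1 i qb))) s0
      = chainM s0 ((PySem.List.pyRange (qc - 1) (qa - 1) (-1)).map (fun i => (i, qb))) := by
    intro s0; simp only [chainM, List.foldl_map]
  rw [conv1, conv2, conv3, conv4, pv_chain_append, pv_chain_append, pv_chain_append]
  rw [pv_W_eq qa qb qc qd h2 h4]
  have hcons : bBorder qa qb qc qd = (qa, qb) :: bTail qa qb qc qd := pv_border_cons _ _ _ _ h4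
  have hnodup : ((qa, qb) :: bTail qa qb qc qd).Nodup := hcons ▸ pv_border_nodup qa qb qc qd h2 h4
  have hnnb : ∀ c ∈ (qa, qb) :: bTail qa qb qc qd, 0 ≤ c.1 ∧ 0 ≤ c.2 := by
    intro c hc; exact pv_border_nonneg qa qb qc qd h1 h3 h2 h4 c (by rw [hcons]; exact hc)
  have hnodW : (bTail qa qb qc qd ++ [(qa, qb)]).Nodup :=
    ((List.perm_append_singleton _ _).nodup_iff).mpr hnodup
  have hnnW : ∀ c ∈ bTail qa qb qc qd ++ [(qa, qb)], 0 ≤ c.1 ∧ 0 ≤ c.2 := by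
    intro c hc; exact hnnb c ((List.perm_append_singleton _ _).mem_iff.mp hc)
  rw [pv_chain_scatter _ m (readM m qa qb) (readM m qa qb) hnodW hnnW]
  rw [hcons]
  have hgW : gatherM m (bTail qa qb qc qd ++ [(qa, qb)])
      = gatherM m (bTail qa qb qc qd) ++ [readM m qa qb] := by simp [gatherM]
  rw [hgW]
  simp only [gatherM, List.map_cons]
  have hTne := pv_bTail_ne_nil qa qb qc qd h2
  set v0 := readM m qa qb with hv0
  set T := bTail qa qb qc qd with hT
  set gT := List.map (fun c => readM m c.1 c.2) T with hgT
  have hgTne : gT ≠ [] := by rw [hgT]; simpa using hTne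
  obtain ⟨w, dl, hsplit⟩ : ∃ w dl, gT = dl ++ [w] :=
    ⟨gT.getLast hgTne, gT.dropLast, (List.dropLast_append_getLast hgTne).symm⟩
  have hvals : v0 :: gT = (v0 :: dl) ++ [w] := by rw [hsplit]; rfl
  have hminB : (PySem.List.min? (v0 :: gT) fun v => v).getD 0 = List.foldl min v0 gT := by
    rw [PySem.List.min?_id_cons]; rfl
  have hminA : List.foldl min v0 (gT ++ [v0]) = List.foldl min v0 gT := by
    rw [List.foldl_append]
    exact min_eq_left (PySem.List.foldl_min_le gT v0).1
  have hs1 : PySem.List.slice (v0 :: gT) (some (-1)) none = [w] := by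
    rw [hvals, PySem.List.slice_from_neg_one]
    have : (v0 :: dl ++ [w]).length - 1 = (v0 :: dl).length := by simp
    rw [this, List.drop_left]
  have hs2 : PySem.List.slice (v0 :: gT) none (some (-1)) = v0 :: dl := by
    rw [hvals, PySem.List.slice_to_neg_one, List.dropLast_concat]
  have hlen : T.length = (v0 :: dl).length := by
    have h1' : gT.length = T.length := by rw [hgT]; simp
    have h2' : gT.length = dl.length + 1 := by rw [hsplit]; simp
    simp [← h1', h2']
  have he : v0 :: (gT ++ [v0]) = (v0 :: dl) ++ [w, v0] := by
    rw [hsplit]; simp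
  rw [he, List.zip_append hlen, hs1, hs2, hminB]
  have hkeys : ∀ p ∈ T.zip (v0 :: dl), (0 ≤ p.1.1 ∧ 0 ≤ p.1.2) ∧ p.1 ≠ (qa, qb) := by
    intro p hp
    have hmem : p.1 ∈ T := (List.of_mem_zip hp).1
    refine ⟨hnnb p.1 (List.mem_cons_of_mem _ hmem), ?_⟩
    intro hpe
    exact (List.nodup_cons.mp hnodup).1 (hpe ▸ hmem)
  have hrot := pv_scatter_rot m qa qb w (T.zip (v0 :: dl)) (by omega) (by omega) hkeys
  simp only [scatterM] at hrot ⊢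
  simp only [List.zip_nil_left, List.cons_append, List.nil_append, List.zip_cons_cons, hminA]
  rw [hrot]



theorem pv_setD_getD_self (m : List (List Int)) (i : Int) (h0 : 0 ≤ i)
    (hlt : i.toNat < m.length) :
    PySem.List.pySetD m i (PySem.List.pyGetD m i []) = m := by
  rw [PySem.List.pySetD_of_nonneg _ _ h0, PySem.List.pyGetD_of_nonneg _ _ h0,
    List.getD_eq_getElem?_getD, List.getElem?_eq_getElem hlt]
  exact List.set_getElem_self ..

theorem pv_inner_to_row (js : List Int) : ∀ (m : List (List Int)) (n : Int) (i : Int), 0 ≤ i →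
    i.toNat < m.length →
    js.foldl (fun (s : List (List Int) × Int) j => (writeM s.1 i j s.2, s.2 + 1)) (m, n)
    = (PySem.List.pySetD m i
         (js.foldl (fun (s : List Int × Int) j => (PySem.List.pySetD s.1 j s.2, s.2 + 1))
            (PySem.List.pyGetD m i [], n)).1,
       (js.foldl (fun (s : List Int × Int) j => (PySem.List.pySetD s.1 j s.2, s.2 + 1))
          (PySem.List.pyGetD m i [], n)).2) := by
  induction js with
  | nil =>
    intro m n i h0 hlt
    simp only [List.foldl_nil]
    rw [pv_setD_getD_self m i h0 hlt]
  | cons j js ih =>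
    intro m n i h0 hlt
    simp only [List.foldl_cons]
    rw [ih (writeM m i j n) (n + 1) i h0 (by unfold writeM; rw [PySem.List.length_pySetD]; exact hlt)]
    unfold writeM
    rw [pv_getD_setD_self m i _ [] h0 hlt, pv_setD_setD_self m i _ _ h0]

theorem pv_take_set (l : List Int) (i : Nat) (v : Int) (h : i < l.length) :
    (l.set i v).take (i + 1) = l.take i ++ [v] := by
  rw [List.set_eq_take_append_cons_drop, if_pos h]
  rw [show i + 1 = (l.take i).length + 1 from by simp [List.length_take]; omega]
  rw [List.take_append]
  simp

theorem pv_row_fill (k : Nat) : ∀ (a n : Int) (r : List Int), 0 ≤ a → a.toNat + k ≤ r.length →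
    (PySem.List.pyRange a (a + (k : Int)) 1).foldl
      (fun (s : List Int × Int) j => (PySem.List.pySetD s.1 j s.2, s.2 + 1)) (r, n)
    = (r.take a.toNat ++ (PySem.List.pyRange a (a + (k : Int)) 1).map (fun j => n + (j - a)) ++
         r.drop (a.toNat + k), n + k) := by
  induction k with
  | zero =>
    intro a n r ha hlen
    rw [show a + ((0 : Nat) : Int) = a from by simp, PySem.List.pyRange_one_eq_nil (le_refl a)]
    simp
  | succ k ih =>
    intro a n r ha hlen
    have hcons : PySem.List.pyRange a (a + ((k + 1 : Nat) : Int)) 1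
        = a :: PySem.List.pyRange (a + 1) (a + ((k + 1 : Nat) : Int)) 1 :=
      PySem.List.pyRange_one_cons (by push_cast; omega)
    have hend : a + ((k + 1 : Nat) : Int) = (a + 1) + (k : Int) := by push_cast; ring
    rw [hcons, List.foldl_cons]
    have hset : PySem.List.pySetD r a n = r.set a.toNat n := PySem.List.pySetD_of_nonneg r n ha
    rw [hset, hend, ih (a + 1) (n + 1) (r.set a.toNat n) (by omega)
      (by simp [List.length_set]; omega)]
    have hto : (a + 1).toNat = a.toNat + 1 := by omega
    rw [hto, pv_take_set r a.toNat n (by omega), List.drop_set_of_lt (show a.toNat < a.toNat + 1 + k by omega)]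
    simp only [List.map_cons, List.append_assoc, List.cons_append, List.nil_append]
    refine congrArg₂ Prod.mk ?_ (by push_cast; ring)
    rw [show n + (a - a) = n from by ring, show a.toNat + (k + 1) = a.toNat + 1 + k from by omega]
    congr 2
    congr 1
    apply List.map_congr_left; intro j hj; ring

theorem pv_getD_append_cons (l1 l2 : List (List Int)) (a : List Int) :
    (l1 ++ a :: l2).getD l1.length [] = a := by
  rw [List.getD_eq_getElem?_getD, List.getElem?_append_right (le_refl _)]
  simp

theorem pv_set_append_cons (l1 l2 : List (List Int)) (a v : List Int) :
    (l1 ++ a :: l2).set l1.length v = l1 ++ v :: l2 := by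
  induction l1 with
  | nil => rfl
  | cons x l1 ih => simp [ih]

theorem pv_outer_fill (C : Int) (hC : 0 ≤ C) (k : Nat) :
    ∀ (x n : Int) (pre rest : List (List Int)), 1 ≤ x → pre.length = x.toNat →
    (PySem.List.pyRange x (x + (k : Int)) 1).foldl
      (fun (s : List (List Int) × Int) i =>
        (PySem.List.pyRange 1 (C + 1) 1).foldl
          (fun (s : List (List Int) × Int) j => (writeM s.1 i j s.2, s.2 + 1)) s)
      (pre ++ List.replicate k (List.replicate (C + 1).toNat (0 : Int)) ++ rest, n)
    = (pre ++ (PySem.List.pyRange x (x + (k : Int)) 1).map (fun i =>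
          (0 : Int) :: (PySem.List.pyRange 1 (C + 1) 1).map (fun j => n + (i - x) * C + (j - 1))) ++
         rest, n + k * C) := by
  induction k with
  | zero =>
    intro x n pre rest hx hpre
    rw [show x + ((0 : Nat) : Int) = x from by simp, PySem.List.pyRange_one_eq_nil (le_refl x)]
    simp
  | succ k ih =>
    intro x n pre rest hx hpre
    have hcons : PySem.List.pyRange x (x + ((k + 1 : Nat) : Int)) 1
        = x :: PySem.List.pyRange (x + 1) (x + ((k + 1 : Nat) : Int)) 1 :=
      PySem.List.pyRange_one_cons (by push_cast; omega)
    have hend : x + ((k + 1 : Nat) : Int) = (x + 1) + (k : Int) := by push_cast; ring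
    have hzrep : List.replicate (k + 1) (List.replicate (C + 1).toNat (0 : Int))
        = List.replicate (C + 1).toNat (0 : Int) :: List.replicate k (List.replicate (C + 1).toNat (0 : Int)) := rfl
    rw [hcons, List.foldl_cons, hzrep]
    have hm0 : pre ++ (List.replicate (C + 1).toNat (0 : Int) :: List.replicate k (List.replicate (C + 1).toNat (0 : Int))) ++ rest
        = pre ++ List.replicate (C + 1).toNat (0 : Int) :: (List.replicate k (List.replicate (C + 1).toNat (0 : Int)) ++ rest) := by
      simp
    rw [hm0]
    rw [pv_inner_to_row _ _ n x (by omega) (by simp; omega)]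
    have hrow0 : PySem.List.pyGetD (pre ++ List.replicate (C + 1).toNat (0 : Int) :: (List.replicate k (List.replicate (C + 1).toNat (0 : Int)) ++ rest)) x []
        = List.replicate (C + 1).toNat (0 : Int) := by
      rw [PySem.List.pyGetD_of_nonneg _ _ (by omega : (0:Int) ≤ x), ← hpre, pv_getD_append_cons]
    rw [hrow0]
    have hrf := pv_row_fill C.toNat 1 n (List.replicate (C + 1).toNat (0 : Int)) (by omega) (by simp; omega)
    rw [show (1 : Int) + ((C.toNat : Nat) : Int) = C + 1 from by omega,
        show ((C.toNat : Nat) : Int) = C from by omega] at hrf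
    rw [hrf]
    have htake : (List.replicate (C + 1).toNat (0 : Int)).take (1 : Int).toNat = [(0 : Int)] := by
      rw [List.take_replicate]
      have : min (1 : Int).toNat (C + 1).toNat = 1 := by omega
      rw [this]
      rfl
    have hdrop : (List.replicate (C + 1).toNat (0 : Int)).drop ((1 : Int).toNat + C.toNat) = ([] : List Int) := by
      rw [List.drop_replicate]
      have : (C + 1).toNat - ((1 : Int).toNat + C.toNat) = 0 := by omega
      rw [this]
      rfl
    rw [htake, hdrop]
    rw [show PySem.List.pySetD (pre ++ List.replicate (C + 1).toNat (0 : Int) :: (List.replicate k (List.replicate (C + 1).toNat (0 : Int)) ++ rest)) x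
          ([(0:Int)] ++ (PySem.List.pyRange 1 (C + 1) 1).map (fun j => n + (j - 1)) ++ [])
        = pre ++ ([(0:Int)] ++ (PySem.List.pyRange 1 (C + 1) 1).map (fun j => n + (j - 1)) ++ []) :: (List.replicate k (List.replicate (C + 1).toNat (0 : Int)) ++ rest) from by
      rw [PySem.List.pySetD_of_nonneg _ _ (by omega : (0:Int) ≤ x), ← hpre, pv_set_append_cons]]
    rw [show pre ++ ([(0:Int)] ++ (PySem.List.pyRange 1 (C + 1) 1).map (fun j => n + (j - 1)) ++ []) :: (List.replicate k (List.replicate (C + 1).toNat (0 : Int)) ++ rest)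
        = (pre ++ [[(0:Int)] ++ (PySem.List.pyRange 1 (C + 1) 1).map (fun j => n + (j - 1)) ++ []]) ++ List.replicate k (List.replicate (C + 1).toNat (0 : Int)) ++ rest from by simp]
    rw [hend, ih (x + 1) (n + C) _ rest (by omega) (by simp [hpre]; omega)]
    have hfun : (fun i => (0:Int) :: (PySem.List.pyRange 1 (C + 1) 1).map (fun j => (n + C) + (i - (x + 1)) * C + (j - 1)))
        = (fun i => (0:Int) :: (PySem.List.pyRange 1 (C + 1) 1).map (fun j => n + (i - x) * C + (j - 1))) := by
      funext i; congr 1; apply List.map_congr_left; intro j _; ring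
    have hhead : (fun j => n + (j - 1)) = (fun j : Int => n + (x - x) * C + (j - 1)) := by
      funext j; ring
    rw [hfun, hhead, ← hend]
    simp only [List.map_cons]
    refine congrArg₂ Prod.mk ?_ (by push_cast; ring)
    simp [List.append_assoc]

theorem pv_init_eq (rows columns : Int) (hr : 1 ≤ rows) (hc : 1 ≤ columns) :
    ((PySem.List.pyRange 1 (rows + 1) 1).foldl
      (fun (s : List (List Int) × Int) i =>
        (PySem.List.pyRange 1 (columns + 1) 1).foldl
          (fun (s : List (List Int) × Int) j => (writeM s.1 i j s.2, s.2 + 1)) s)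
      ((PySem.List.pyRange 0 (rows + 1) 1).map
        (fun _ => PySem.List.pyRepeat [(0 : Int)] (columns + 1)), 1)).1
    = [PySem.List.pyRepeat [(0 : Int)] (columns + 1)] ++
      (PySem.List.pyRange 1 (rows + 1) 1).map (fun i =>
        [(0 : Int)] ++ (PySem.List.pyRange 1 (columns + 1) 1).map (fun j => (i - 1) * columns + j)) := by
  have hz : PySem.List.pyRepeat [(0 : Int)] (columns + 1)
      = List.replicate (columns + 1).toNat (0 : Int) := PySem.List.pyRepeat_singleton 0 (columns + 1)
  have harr0 : (PySem.List.pyRange 0 (rows + 1) 1).map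
        (fun _ => PySem.List.pyRepeat [(0 : Int)] (columns + 1))
      = [List.replicate (columns + 1).toNat (0 : Int)] ++
        List.replicate rows.toNat (List.replicate (columns + 1).toNat (0 : Int)) ++ [] := by
    rw [hz]
    rw [List.map_const']
    rw [PySem.List.length_pyRange_one]
    rw [show ((rows : Int) + 1 - 0).toNat = rows.toNat + 1 from by omega]
    simp [List.replicate_succ]
  have hof := pv_outer_fill columns (by omega) rows.toNat 1 1
    [List.replicate (columns + 1).toNat (0 : Int)] [] (by omega) (by simp)
  rw [show (1 : Int) + ((rows.toNat : Nat) : Int) = rows + 1 from by omega] at hof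
  rw [harr0, hof]
  rw [hz]
  simp only [List.append_nil]
  congr 1
  apply List.map_congr_left
  intro i _
  congr 1
  apply List.map_congr_left
  intro j _
  ring

-- ===== VERDICT (by name: the statement is the Claim_ definition above) =====
theorem solution_spec : Claim_equal_solution := by
  unfold Claim_equal_solution
  intro rows columns queries hdom hpre
  unfold Spec_solution
  cases queries with
  | nil => rfl
  | cons q qs =>
    obtain ⟨hl, ha1, hac, hcr, hb1, hbd, hdc⟩ := hpre q (by simp)
    have hinit := pv_init_eq rows columns (by omega) (by omega)
    show ((q :: qs).foldl qStepA
        (((PySem.List.pyRange 1 (rows + 1) 1).foldl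
          (fun (s : List (List Int) × Int) i =>
            (PySem.List.pyRange 1 (columns + 1) 1).foldl
              (fun (s : List (List Int) × Int) j => (writeM s.1 i j s.2, s.2 + 1)) s)
          ((PySem.List.pyRange 0 (rows + 1) 1).map
            (fun _ => PySem.List.pyRepeat [(0 : Int)] (columns + 1)), 1)).1, [])).2
      = ((q :: qs).foldl qStepB
          ([PySem.List.pyRepeat [(0 : Int)] (columns + 1)] ++
            (PySem.List.pyRange 1 (rows + 1) 1).map (fun i =>
              [(0 : Int)] ++ (PySem.List.pyRange 1 (columns + 1) 1).map
                (fun j => (i - 1) * columns + j)), [])).2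
    rw [hinit]
    exact congrArg Prod.snd (PySem.List.foldl_congr_mem (q :: qs) qStepA qStepB _
      (fun acc p hp => pv_step_eq acc p
        ⟨(hpre p hp).1, (hpre p hp).2.1, (hpre p hp).2.2.1, (hpre p hp).2.2.2.2.1,
         (hpre p hp).2.2.2.2.2.1⟩))
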